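-- pv_equiv track=rewrite | github.com/whitemech/FOND4LTLf | AutomaParser/aparser.py | get_final_label
-- ===== SOURCE A (Python) =====
-- def get_final_label(label):
--
--     s1 = label.replace(" ", "")
--     s2 = s1.replace('"','')
--
--     if len(s2) < 2:
--         return _split_dont_care(list(s2))
--     else:
--         s3 = s2.replace(",","")
--         s4 = s3.split('\\n') # now s4 should be a list like ['01', '0X', '00']
--
--         leng_elem = len(s4[0])#length of elements in s4
--         temp = ''
--         inter_label = []
--         for i in range(leng_elem):
--             for elem in s4:
--                 temp += elem[i]
--             inter_label.append(temp)
--             temp = ''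
--
--         # inter_label should be like ['000','1X0']
--         final_label = []
--         for lab in inter_label:
--             final_label += _split_dont_care(list(lab))
--
--         return final_label
--
-- def _split_dont_care(label_list):
--     final = []
--     return split_dont_care(label_list, final)
--
-- def split_dont_care(label_list, splitted):
--     if 'X' in label_list:
--         lowest_index = label_list.index('X')
--         label_list[lowest_index] = '0'
--         split_dont_care(label_list, splitted)
--         label_list[lowest_index] = '1'
--         split_dont_care(label_list, splitted)
--         label_list[lowest_index] = 'X'
--     else:
--         splitted += [''.join(label_list)]
--     return splitted
-- ===== SOURCE B (Python) =====
-- def get_final_label(label):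
--     s2 = label.replace(" ", "").replace('"', '')
--     if len(s2) < 2:
--         cols = [s2]
--     else:
--         rows = s2.replace(",", "").split('\\n')
--         cols = [''.join(t) for t in zip(*rows)]
--     out = []
--     for col in cols:
--         res = ['']
--         for c in col:
--             if c == 'X':
--                 res = [p + b for p in res for b in '01']
--             else:
--                 res = [p + c for p in res]
--         out.extend(res)
--     return out
-- ===== Notes on version B (the rewrite author's own statement) =====
-- stated objective: simpler
-- what changed: Replaces the index-loop transpose by zip(*rows) and the mutating recursive don't-care splitter by a single left-to-right fold that doubles the list of prefixes at each 'X'.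
-- outside the precondition, e.g. on get_final_label('01\\n0'): A raises IndexError, B returns ['00']
import Mathlib
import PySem

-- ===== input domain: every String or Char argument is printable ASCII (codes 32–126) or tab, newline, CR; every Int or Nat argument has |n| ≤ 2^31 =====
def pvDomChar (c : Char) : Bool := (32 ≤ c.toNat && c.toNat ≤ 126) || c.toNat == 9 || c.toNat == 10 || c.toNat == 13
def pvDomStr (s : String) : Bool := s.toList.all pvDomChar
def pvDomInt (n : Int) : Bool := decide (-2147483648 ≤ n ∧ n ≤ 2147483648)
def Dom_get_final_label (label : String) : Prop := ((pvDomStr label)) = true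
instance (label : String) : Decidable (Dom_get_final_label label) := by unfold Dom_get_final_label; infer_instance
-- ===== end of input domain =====

-- B replaces A's index-loop transpose by a zip-style truncating transpose and A's mutating
-- recursive don't-care splitter by a single left-to-right fold doubling the prefix list at each 'X'.


-- ===== PORT A =====
-- termination helper for splitDontCare: overwriting the first 'X' lowers the 'X'-count
theorem pvCountSetLt (l : List Char) (i : Nat) (c : Char) (hi : i < l.length)
    (hx : l[i] = 'X') (hc : c ≠ 'X') : (l.set i c).count 'X' < l.count 'X' := by
  induction l generalizing i with
  | nil => simp at hi
  | cons a t ih =>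
    cases i with
    | zero =>
      simp only [List.getElem_cons_zero] at hx
      subst hx
      simp [hc]
    | succ j =>
      simp only [List.getElem_cons_succ] at hx
      simp only [List.length_cons, Nat.succ_lt_succ_iff] at hi
      have := ih j hi hx
      simp only [List.set_cons_succ, List.count_cons]
      omega

-- split_dont_care mutates label_list in place; the port threads the list value through the two
-- recursive calls (the final restore of 'X' does not affect the returned `splitted`).
def splitDontCare (l : List Char) (splitted : List String) : List String :=
  match h : PySem.List.index? l 'X' with
  | some i =>
      splitDontCare (l.set i '1') (splitDontCare (l.set i '0') splitted)
  | none => splitted ++ [String.ofList l]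
termination_by l.count 'X'
decreasing_by
  all_goals obtain ⟨hk, hx, -⟩ := PySem.List.getElem_of_index?_eq_some h
  · exact pvCountSetLt l i '0' hk hx (by decide)
  · exact pvCountSetLt l i '1' hk hx (by decide)

-- get_final_label, on the code-point lists (PySem string ops are defined there)
def get_final_label (label : String) : List String :=
  let s1 := PySem.Chars.replace label.toList [' '] []
  let s2 := PySem.Chars.replace s1 ['"'] []
  if s2.length < 2 then
    splitDontCare s2 []
  else
    let s3 := PySem.Chars.replace s2 [','] []
    let s4 := PySem.Chars.splitOn s3 ['\\', 'n']    -- s3.split('\\n'): the two-char separator backslash+n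
    let leng := (PySem.List.pyGetD s4 0 []).length  -- s4[0]; str.split never returns [], the default is unreachable
    -- elem[i]: Pre_ guarantees i is in range for every elem of s4 (IndexError otherwise)
    let interLabel := (PySem.List.pyRange 0 (leng : Int) 1).foldl (fun acc i =>
        acc ++ [s4.foldl (fun temp elem => temp ++ [PySem.List.pyGetD elem i ' ']) []]) []
    interLabel.foldl (fun fl lab => fl ++ splitDontCare lab []) []

-- ===== PORT B =====
-- zip(*rows): the columns, truncated at the shortest row
def zipStar : List (List Char) → List (List Char)
  | [] => []
  | r :: rs =>
      if h : (r :: rs).any List.isEmpty then []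
      else (r :: rs).map (fun x => x.headD ' ') :: zipStar ((r :: rs).map List.tail)
termination_by rows => (rows.headD []).length
decreasing_by
  simp only [List.any_cons, Bool.or_eq_true, not_or] at h
  cases r with
  | nil => simp at h
  | cons a t => simp

-- res = [''] ; for c in col: res doubles at 'X', else every prefix is extended by c
def expandX (col : List Char) : List (List Char) :=
  col.foldl (fun res c =>
    if c = 'X' then res.flatMap (fun p => ['0', '1'].map (fun b => p ++ [b]))
    else res.map (fun p => p ++ [c])) [[]]

def get_final_label_alt (label : String) : List String :=
  let s2 := PySem.Chars.replace (PySem.Chars.replace label.toList [' '] []) ['"'] []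
  let cols :=
    if s2.length < 2 then [s2]
    else zipStar (PySem.Chars.splitOn (PySem.Chars.replace s2 [','] []) ['\\', 'n'])
  cols.foldl (fun out col => out ++ (expandX col).map String.ofList) []

-- ===== PRECONDITION & SPEC =====
-- Pre_ excludes exactly the ragged multi-row labels on which A's transpose raises IndexError
-- (some row of the '\n'-split is shorter than the first row); B truncates the columns there.
def Pre_get_final_label (label : String) : Prop :=
  let s2 := PySem.Chars.replace (PySem.Chars.replace label.toList [' '] []) ['"'] []
  let rows := PySem.Chars.splitOn (PySem.Chars.replace s2 [','] []) ['\\', 'n']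
  s2.length < 2 ∨ ∀ r ∈ rows, (rows.headD []).length ≤ r.length
instance (label : String) : Decidable (Pre_get_final_label label) := by
  unfold Pre_get_final_label; infer_instance

def pvWitness_get_final_label : String := "01\\n1X"

def Spec_get_final_label (label : String) (out : List String) : Prop := out = get_final_label_alt label
instance (label : String) (out : List String) : Decidable (Spec_get_final_label label out) := by unfold Spec_get_final_label; infer_instance

-- ===== CLAIM (what is proved, stated in full; the proofs are below) =====
def Claim_equal_get_final_label : Prop := ∀ (label : String), Dom_get_final_label label → Pre_get_final_label label → Spec_get_final_label label (get_final_label label)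

-- ===== LEMMAS AND PROOFS =====

-- reference expansion: leftmost character is most significant, '0' before '1'
def pvR : List Char → List (List Char)
  | [] => [[]]
  | c :: t => if c = 'X' then (pvR t).map ('0' :: ·) ++ (pvR t).map ('1' :: ·)
              else (pvR t).map (c :: ·)

theorem pvR_noX (l : List Char) (h : 'X' ∉ l) : pvR l = [l] := by
  induction l with
  | nil => rfl
  | cons c t ih =>
    simp only [List.mem_cons, not_or] at h
    simp [pvR, Ne.symm h.1, ih h.2]

theorem pvR_append (u m : List Char) (h : 'X' ∉ u) : pvR (u ++ m) = (pvR m).map (u ++ ·) := by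
  induction u with
  | nil => simp
  | cons c u' ih =>
    simp only [List.mem_cons, not_or] at h
    simp [pvR, Ne.symm h.1, ih h.2, List.map_map, Function.comp]

theorem pvR_split (u v : List Char) (hu : 'X' ∉ u) :
    pvR (u ++ 'X' :: v) = pvR (u ++ '0' :: v) ++ pvR (u ++ '1' :: v) := by
  rw [pvR_append u _ hu, pvR_append u _ hu, pvR_append u _ hu]
  simp [pvR, List.map_map, Function.comp]

theorem pvSet_append (u v : List Char) (b : Char) :
    (u ++ 'X' :: v).set u.length b = u ++ b :: v := by
  induction u with
  | nil => rfl
  | cons c u' ih => simpa using ih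

theorem pvSdc_aux (n : Nat) : ∀ (l : List Char) (acc : List String), l.count 'X' = n →
    splitDontCare l acc = acc ++ (pvR l).map String.ofList := by
  induction n with
  | zero =>
    intro l acc hc
    have hnot : 'X' ∉ l := by
      intro hm; have := List.count_pos_iff.mpr hm; omega
    rw [splitDontCare]
    split
    · rename_i i h
      obtain ⟨hk, hx, -⟩ := PySem.List.getElem_of_index?_eq_some h
      exact absurd (hx ▸ List.getElem_mem hk) hnot
    · rw [pvR_noX l hnot]; rfl
  | succ n ih =>
    intro l acc hc
    have hmem : 'X' ∈ l := by
      by_contra hnot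
      rw [List.count_eq_zero.mpr hnot] at hc; omega
    rw [splitDontCare]
    split
    · rename_i i h
      obtain ⟨u, v, hl, hlen, hu⟩ := (PySem.List.index?_eq_some_iff l 'X' i).mp h
      subst hl
      have hcu : u.count 'X' = 0 := List.count_eq_zero.mpr hu
      have hcv : v.count 'X' = n := by
        simp [List.count_append] at hc; omega
      have hset : ∀ b : Char, (u ++ 'X' :: v).set i b = u ++ b :: v := by
        intro b; rw [← hlen]; exact pvSet_append u v b
      have hcb : ∀ b : Char, b ≠ 'X' → (u ++ b :: v).count 'X' = n := by
        intro b hb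
        simp [List.count_append, hb, hcu, hcv]
      rw [hset '0', hset '1',
          ih _ acc (hcb '0' (by decide)), ih _ _ (hcb '1' (by decide)),
          pvR_split u v hu]
      simp
    · rename_i h
      exact absurd hmem ((PySem.List.index?_eq_none_iff l 'X').mp h)

theorem pvSdc (l : List Char) : splitDontCare l [] = (pvR l).map String.ofList := by
  simpa using pvSdc_aux (l.count 'X') l [] rfl

theorem pvExpand_foldl (l : List Char) (res : List (List Char)) :
    l.foldl (fun res c =>
      if c = 'X' then res.flatMap (fun p => ['0', '1'].map (fun b => p ++ [b]))
      else res.map (fun p => p ++ [c])) res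
    = res.flatMap (fun p => (pvR l).map (p ++ ·)) := by
  induction l generalizing res with
  | nil => simp [pvR]
  | cons c t ih =>
    rw [List.foldl_cons, ih]
    by_cases hc : c = 'X'
    · subst hc
      rw [if_pos rfl]
      induction res with
      | nil => simp
      | cons p ps ihp =>
        simp only [List.flatMap_cons, List.flatMap_append, ihp]
        congr 1
        simp [pvR, List.map_map, Function.comp_def, List.append_assoc]
    · rw [if_neg hc]
      simp only [List.flatMap_map]
      congr 1
      funext p
      simp [pvR, if_neg hc, List.map_map, Function.comp, List.append_assoc]

theorem pvExpandX_eq (col : List Char) : expandX col = pvR col := by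
  rw [expandX, pvExpand_foldl]
  simp

theorem pvGetD_zero_headD (l : List Char) : l.getD 0 ' ' = l.headD ' ' := by
  cases l <;> simp [List.getD]

theorem pvGetD_succ_tail (l : List Char) (i : Nat) : l.getD (i + 1) ' ' = l.tail.getD i ' ' := by
  cases l <;> simp [List.getD]

theorem pvZipStar_eq (n : Nat) : ∀ (rows : List (List Char)),
    n = (rows.headD []).length → (∀ r ∈ rows, n ≤ r.length) →
    zipStar rows = (List.range n).map (fun i => rows.map (fun r => r.getD i ' ')) := by
  induction n with
  | zero =>
    intro rows hn _
    cases rows with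
    | nil => rw [zipStar]; simp
    | cons r rs =>
      simp only [List.headD_cons] at hn
      rw [zipStar]
      simp [List.length_eq_zero_iff.mp hn.symm]
  | succ n ih =>
    intro rows hn h
    cases rows with
    | nil => simp at hn
    | cons r rs =>
      simp only [List.headD_cons] at hn
      have hne : ∀ x ∈ r :: rs, x ≠ [] := by
        intro x hx hxe
        have := h x hx
        simp [hxe] at this
      rw [zipStar]
      rw [dif_neg (by
            simp only [List.any_eq_true, not_exists, not_and]
            intro x hx
            simp [List.isEmpty_eq_false_iff.mpr (hne x hx)])]
      rw [ih ((r :: rs).map List.tail)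
            (by cases r with
                | nil => simp at hn
                | cons a t =>
                  simp only [List.length_cons] at hn
                  simp only [List.map_cons, List.headD_cons, List.tail_cons] at *
                  omega)
            (by intro r' hr'
                simp only [List.mem_map] at hr'
                obtain ⟨x, hx, rfl⟩ := hr'
                have := h x hx
                have hxne := hne x hx
                cases x with
                | nil => exact absurd rfl hxne
                | cons a t => simp at this ⊢; omega)]
      rw [List.range_succ_eq_map]
      refine congrArg₂ (· :: ·) ?_ ?_
      · exact List.map_congr_left fun x _ => (pvGetD_zero_headD x).symm
      · rw [List.map_map]
        refine List.map_congr_left fun i _ => ?_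
        rw [List.map_map]
        exact List.map_congr_left fun x _ => (pvGetD_succ_tail x i).symm

-- ===== VERDICT (by name: the statement is the Claim_ definition above) =====
theorem get_final_label_spec : Claim_equal_get_final_label := by
  intro label _ hPre
  unfold Spec_get_final_label get_final_label get_final_label_alt
  simp only [Pre_get_final_label] at hPre
  by_cases hlt : (PySem.Chars.replace (PySem.Chars.replace label.toList [' '] []) ['"'] []).length < 2
  · simp only [if_pos hlt, List.foldl_cons, List.foldl_nil, List.nil_append, pvSdc, pvExpandX_eq]
  · simp only [if_neg hlt]
    have hPre' : ∀ r ∈ PySem.Chars.splitOn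
        (PySem.Chars.replace (PySem.Chars.replace (PySem.Chars.replace label.toList [' '] []) ['"'] []) [','] [])
        ['\\', 'n'],
        ((PySem.Chars.splitOn
          (PySem.Chars.replace (PySem.Chars.replace (PySem.Chars.replace label.toList [' '] []) ['"'] []) [','] [])
          ['\\', 'n']).headD []).length ≤ r.length := by
      rcases hPre with h | h
      · exact absurd h hlt
      · exact h
    set s4 := PySem.Chars.splitOn
        (PySem.Chars.replace (PySem.Chars.replace (PySem.Chars.replace label.toList [' '] []) ['"'] []) [','] [])
        ['\\', 'n'] with hs4
    have hL : (PySem.List.pyGetD s4 0 []).length = (s4.headD []).length := by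
      cases s4 <;> simp [pysem, List.getD]
    rw [pvZipStar_eq (s4.headD []).length s4 rfl hPre']
    simp only [PySem.List.foldl_append_singleton_eq_map, List.nil_append, hL,
      PySem.List.pyRange_zero_nat, List.map_map,
      PySem.List.foldl_append_eq_flatMap, pvSdc, pvExpandX_eq]
    congr 1
    refine List.map_congr_left fun k _ => ?_
    simp [Function.comp, PySem.List.pyGetD_natCast]
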